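-- pv_equiv track=rewrite | github.com/OSGeo/grass | gui/wxpython/core/utils.py | ListOfCatsToRange
-- ===== SOURCE A (Python) =====
-- def ListOfCatsToRange(cats):
--     """Convert list of category number to range(s)
--
--     Used for example for d.vect cats=[range]
--
--     :param cats: category list
--
--     :return: category range string
--     :return: '' on error
--     """
--
--     catstr = ""
--
--     try:
--         cats = list(map(int, cats))
--     except ValueError:
--         return catstr
--
--     i = 0
--     while i < len(cats):
--         next = 0
--         j = i + 1
--         while j < len(cats):
--             if cats[i + next] != cats[j] - 1:
--                 break
--             next += 1
--             j += 1
--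
--         if next > 1:
--             catstr += "%d-%d," % (cats[i], cats[i + next])
--             i += next + 1
--         else:
--             catstr += "%d," % (cats[i])
--             i += 1
--
--     return catstr.strip(",")
-- ===== SOURCE B (Python) =====
-- from itertools import groupby
--
--
-- def ListOfCatsToRange(cats):
--     """Convert list of category number to range(s) (idiomatic rewrite).
--
--     :param cats: category list
--
--     :return: category range string
--     :return: '' on error
--     """
--     try:
--         cats = list(map(int, cats))
--     except ValueError:
--         return ""
--
--     parts = []
--     # maximal runs of consecutive integers share the key value - index
--     for _, grp in groupby(enumerate(cats), key=lambda t: t[1] - t[0]):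
--         run = [v for _, v in grp]
--         if len(run) >= 3:
--             parts.append("%d-%d" % (run[0], run[-1]))
--         else:
--             parts.extend("%d" % v for v in run)
--     return ",".join(parts)
-- ===== Notes on version B (the rewrite author's own statement) =====
-- stated objective: idiomatic
-- what changed: Replaces A's nested index-walking while loops plus trailing-comma strip by a single itertools.groupby pass over enumerate(cats) keyed by value-index (each group is a maximal consecutive run), collecting chunk strings in a list joined once with ','.
import Mathlib
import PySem

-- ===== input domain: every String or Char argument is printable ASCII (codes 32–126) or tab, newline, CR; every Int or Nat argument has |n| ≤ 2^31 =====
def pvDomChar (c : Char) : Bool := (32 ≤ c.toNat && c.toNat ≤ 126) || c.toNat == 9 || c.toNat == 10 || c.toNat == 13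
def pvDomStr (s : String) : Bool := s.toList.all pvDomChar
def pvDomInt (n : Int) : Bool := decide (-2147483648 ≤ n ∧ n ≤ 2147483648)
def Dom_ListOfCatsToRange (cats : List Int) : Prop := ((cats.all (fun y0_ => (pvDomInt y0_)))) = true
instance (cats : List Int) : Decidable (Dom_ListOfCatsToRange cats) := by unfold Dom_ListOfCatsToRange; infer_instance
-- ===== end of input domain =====

-- B rewrites A's nested index-walking while loops as an itertools.groupby pass over
-- enumerate(cats) keyed by value - index, joining the chunk strings with ','  (objective: idiomatic).

-- ===== PORT A =====
-- the inner 'while j < len(cats)' loop; the indices i+next and j are always in range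
-- when they are read, so getD is exact here
def pvInnerA (cats : List Int) (next j i : Nat) : Nat :=
  if _h : j < cats.length then
    if cats.getD (i + next) 0 ≠ cats.getD j 0 - 1 then next
    else pvInnerA cats (next + 1) (j + 1) i
  else next
termination_by cats.length - j

-- the outer 'while i < len(cats)' loop; catstr is carried as List Char
def pvOuterA (cats : List Int) (i : Nat) (catstr : List Char) : List Char :=
  if _h : i < cats.length then
    let next := pvInnerA cats 0 (i + 1) i
    if next > 1 then
      pvOuterA cats (i + next + 1)
        (catstr ++ PySem.Int.toChars (cats.getD i 0) ++ ['-'] ++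
          PySem.Int.toChars (cats.getD (i + next) 0) ++ [','])
    else
      pvOuterA cats (i + 1) (catstr ++ PySem.Int.toChars (cats.getD i 0) ++ [','])
  else catstr
termination_by cats.length - i

-- cats : List Int, so 'list(map(int, cats))' is the identity and ValueError cannot occur
def ListOfCatsToRange (cats : List Int) : String :=
  String.ofList (PySem.Chars.stripChars (pvOuterA cats 0 []) [','])

-- ===== PORT B =====
-- hand port of itertools.groupby over the enumerate pairs with key t.2 - t.1
-- (groupby yields the maximal runs of consecutive pairs with equal keys)
def pvGroups : List (Int × Int) → List (List (Int × Int))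
  | [] => []
  | [p] => [[p]]
  | p :: q :: ps =>
    match pvGroups (q :: ps) with
    | g :: gs => if p.2 - p.1 == q.2 - q.1 then (p :: g) :: gs else [p] :: g :: gs
    | [] => [[p]]

def ListOfCatsToRange_alt (cats : List Int) : String :=
  let groups := pvGroups (PySem.List.enumerate cats 0)
  let parts := groups.flatMap (fun g =>
    let run : List Int := g.map Prod.snd
    if 3 ≤ run.length then
      [PySem.Int.toChars (PySem.List.pyGetD run 0 0) ++ ['-'] ++
        PySem.Int.toChars (PySem.List.pyGetD run (-1) 0)]
    else run.map PySem.Int.toChars)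
  String.ofList (PySem.Chars.join [','] parts)

-- ===== PRECONDITION & SPEC =====
def Spec_ListOfCatsToRange (cats : List Int) (out : String) : Prop := out = ListOfCatsToRange_alt cats
instance (cats : List Int) (out : String) : Decidable (Spec_ListOfCatsToRange cats out) := by unfold Spec_ListOfCatsToRange; infer_instance

-- ===== CLAIM (what is proved, stated in full; the proofs are below) =====
def Claim_equal_ListOfCatsToRange : Prop := ∀ (cats : List Int), Dom_ListOfCatsToRange cats → Spec_ListOfCatsToRange cats (ListOfCatsToRange cats)

-- ===== LEMMAS AND PROOFS =====

-- length of the maximal initial run of consecutive integers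
def pvRunlen : List Int → Nat
  | [] => 0
  | [_] => 1
  | x :: y :: t => if x + 1 = y then pvRunlen (y :: t) + 1 else 1

theorem pvRunlen_pos (x : Int) (xs : List Int) : 1 ≤ pvRunlen (x :: xs) := by
  cases xs with
  | nil => simp [pvRunlen]
  | cons y t => simp only [pvRunlen]; split <;> omega

theorem pvRunlen_le_length (l : List Int) : pvRunlen l ≤ l.length := by
  induction l with
  | nil => simp [pvRunlen]
  | cons x xs ih =>
    cases xs with
    | nil => simp [pvRunlen]
    | cons y t =>
      simp only [List.length_cons] at ih ⊢
      simp only [pvRunlen]; split <;> omega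

-- the run decomposition both programs compute
def pvRuns (l : List Int) : List (List Int) :=
  if h : l = [] then []
  else l.take (pvRunlen l) :: pvRuns (l.drop (pvRunlen l))
termination_by l.length
decreasing_by
  cases l with
  | nil => exact absurd rfl h
  | cons x xs => simp only [List.length_drop, List.length_cons]
                 have := pvRunlen_pos x xs; omega

theorem pvRuns_nil : pvRuns [] = [] := by rw [pvRuns]; simp

theorem pvRuns_cons (x : Int) (xs : List Int) :
    pvRuns (x :: xs) =
      (x :: xs).take (pvRunlen (x :: xs)) :: pvRuns ((x :: xs).drop (pvRunlen (x :: xs))) := by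
  rw [pvRuns]; simp

-- A's per-run chunk strings (no commas yet)
def pvChunks (l : List Int) : List (List Char) :=
  if h : l = [] then []
  else
    let r := pvRunlen l
    if 2 < r then
      (PySem.Int.toChars (l.headD 0) ++ ['-'] ++ PySem.Int.toChars (l.getD (r - 1) 0))
        :: pvChunks (l.drop r)
    else
      PySem.Int.toChars (l.headD 0) :: pvChunks l.tail
termination_by l.length
decreasing_by
  · cases l with
    | nil => exact absurd rfl h
    | cons x xs => simp only [List.length_drop, List.length_cons]
                   have := pvRunlen_pos x xs; omega
  · cases l with
    | nil => exact absurd rfl h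
    | cons x xs => simp

-- === A side: the loops compute the chunk decomposition ===

theorem pvInnerA_eq (cats : List Int) :
    ∀ fuel i next, cats.length - (i + next + 1) ≤ fuel → i + next < cats.length →
      pvInnerA cats next (i + next + 1) i = next + (pvRunlen (cats.drop (i + next)) - 1) := by
  intro fuel
  induction fuel with
  | zero =>
    intro i next hfuel hlt
    have hj : ¬ (i + next + 1 < cats.length) := by omega
    have hdrop : cats.drop (i + next) = [cats[i + next]] := by
      rw [List.drop_eq_getElem_cons hlt, List.drop_eq_nil_of_le (by omega)]
    rw [pvInnerA]
    simp [hj, hdrop, pvRunlen]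
  | succ fuel ih =>
    intro i next hfuel hlt
    by_cases hj : i + next + 1 < cats.length
    · have hdrop : cats.drop (i + next) = cats[i + next] :: cats.drop (i + next + 1) :=
        List.drop_eq_getElem_cons hlt
      have hdrop2 : cats.drop (i + next + 1) = cats[i + next + 1] :: cats.drop (i + next + 2) :=
        List.drop_eq_getElem_cons hj
      have hga : cats.getD (i + next) 0 = cats[i + next] := List.getD_eq_getElem cats 0 hlt
      have hgb : cats.getD (i + next + 1) 0 = cats[i + next + 1] := List.getD_eq_getElem cats 0 hj
      rw [pvInnerA]
      simp only [hj, dite_true, hga, hgb]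
      by_cases hc : cats[i + next] = cats[i + next + 1] - 1
      · -- run continues
        have hrun : pvRunlen (cats.drop (i + next)) = pvRunlen (cats.drop (i + next + 1)) + 1 := by
          rw [hdrop, hdrop2]
          simp only [pvRunlen]
          rw [← hdrop2]
          rw [if_pos (by omega)]
        have hrec : pvInnerA cats (next + 1) (i + (next + 1) + 1) i =
            (next + 1) + (pvRunlen (cats.drop (i + (next + 1))) - 1) :=
          ih i (next + 1) (by omega) (by omega)
        have hpos : 1 ≤ pvRunlen (cats.drop (i + next + 1)) := by
          rw [hdrop2]; exact pvRunlen_pos _ _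
        rw [if_neg (by omega)]
        have h1 : i + (next + 1) + 1 = i + next + 1 + 1 := by omega
        rw [h1] at hrec
        have h2 : i + (next + 1) = i + next + 1 := by omega
        rw [h2] at hrec
        rw [hrec, hrun]
        omega
      · -- run breaks
        rw [if_pos (by omega)]
        have hrun : pvRunlen (cats.drop (i + next)) = 1 := by
          rw [hdrop, hdrop2]
          simp only [pvRunlen]
          rw [← hdrop2]
          rw [if_neg (by omega)]
        rw [hrun]
        omega
    · have hdrop : cats.drop (i + next) = [cats[i + next]] := by
        rw [List.drop_eq_getElem_cons hlt, List.drop_eq_nil_of_le (by omega)]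
      rw [pvInnerA]
      simp [hj, hdrop, pvRunlen]

theorem pvOuterA_eq (cats : List Int) :
    ∀ fuel i acc, cats.length - i ≤ fuel →
      pvOuterA cats i acc = acc ++ ((pvChunks (cats.drop i)).map (· ++ [','])).flatten := by
  intro fuel
  induction fuel with
  | zero =>
    intro i acc hfuel
    have : ¬ (i < cats.length) := by omega
    rw [pvOuterA]
    simp [this, List.drop_eq_nil_of_le (by omega : cats.length ≤ i), pvChunks]
  | succ fuel ih =>
    intro i acc hfuel
    by_cases hi : i < cats.length
    · have hdrop : cats.drop i = cats[i] :: cats.drop (i + 1) := List.drop_eq_getElem_cons hi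
      have hinner : pvInnerA cats 0 (i + 0 + 1) i = 0 + (pvRunlen (cats.drop (i + 0)) - 1) :=
        pvInnerA_eq cats cats.length i 0 (by omega) (by omega)
      simp only [Nat.add_zero, Nat.zero_add] at hinner
      have hrpos : 1 ≤ pvRunlen (cats.drop i) := by rw [hdrop]; exact pvRunlen_pos _ _
      have hrlen : pvRunlen (cats.drop i) ≤ cats.length - i := by
        have := pvRunlen_le_length (cats.drop i)
        simpa using this
      have hga : cats.getD i 0 = cats[i] := List.getD_eq_getElem cats 0 hi
      have hhead : (cats.drop i).headD 0 = cats[i] := by rw [hdrop]; rfl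
      rw [pvOuterA]
      simp only [hi, dite_true, hinner]
      by_cases hb : pvRunlen (cats.drop i) - 1 > 1
      · -- range chunk: runlen > 2
        rw [if_pos hb]
        have hglast : cats.getD (i + (pvRunlen (cats.drop i) - 1)) 0 =
            (cats.drop i).getD (pvRunlen (cats.drop i) - 1) 0 := by
          rw [List.getD_eq_getElem?_getD, List.getD_eq_getElem?_getD, List.getElem?_drop]
        have hchunks : pvChunks (cats.drop i) =
            (PySem.Int.toChars ((cats.drop i).headD 0) ++ ['-'] ++
              PySem.Int.toChars ((cats.drop i).getD (pvRunlen (cats.drop i) - 1) 0))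
              :: pvChunks ((cats.drop i).drop (pvRunlen (cats.drop i))) := by
          rw [pvChunks, dif_neg (by simp; omega)]
          simp only []
          rw [if_pos (by omega)]
        have hdd : (cats.drop i).drop (pvRunlen (cats.drop i)) =
            cats.drop (i + pvRunlen (cats.drop i)) := by
          rw [List.drop_drop]
        have hrec := ih (i + (pvRunlen (cats.drop i) - 1) + 1)
          (acc ++ PySem.Int.toChars (cats.getD i 0) ++ ['-'] ++
            PySem.Int.toChars (cats.getD (i + (pvRunlen (cats.drop i) - 1)) 0) ++ [','])
          (by omega)
        rw [hrec, hchunks]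
        have hidx : i + (pvRunlen (cats.drop i) - 1) + 1 = i + pvRunlen (cats.drop i) := by omega
        rw [hidx, ← hdd]
        simp only [List.map_cons, List.flatten_cons, hga, hhead, hglast]
        simp [List.append_assoc]
      · -- single chunk: runlen ≤ 2
        rw [if_neg hb]
        have hchunks : pvChunks (cats.drop i) =
            PySem.Int.toChars ((cats.drop i).headD 0) :: pvChunks (cats.drop i).tail := by
          rw [pvChunks, dif_neg (by simp; omega)]
          simp only []
          rw [if_neg (by omega)]
        have htail : (cats.drop i).tail = cats.drop (i + 1) := by rw [hdrop]; rfl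
        have hrec := ih (i + 1) (acc ++ PySem.Int.toChars (cats.getD i 0) ++ [',']) (by omega)
        rw [hrec, hchunks, htail]
        simp only [List.map_cons, List.flatten_cons, hga, hhead]
        simp [List.append_assoc]
    · rw [pvOuterA]
      simp [hi, List.drop_eq_nil_of_le (by omega : cats.length ≤ i), pvChunks]

-- === B side: groupby produces the run decomposition ===

theorem pvGroups_ne_nil (p : Int × Int) (ps : List (Int × Int)) : pvGroups (p :: ps) ≠ [] := by
  cases ps with
  | nil => simp [pvGroups]
  | cons q t =>
    rw [pvGroups]
    rcases pvGroups (q :: t) with _ | ⟨g, gs⟩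
    · simp
    · dsimp only
      split <;> simp

theorem pvGroups_eq_runs (cats : List Int) :
    ∀ s, (pvGroups (PySem.List.enumerate cats s)).map (List.map Prod.snd) = pvRuns cats := by
  induction cats with
  | nil => intro s; simp [PySem.List.enumerate_nil, pvGroups, pvRuns_nil]
  | cons x xs ih =>
    intro s
    cases xs with
    | nil =>
      simp [PySem.List.enumerate_cons, PySem.List.enumerate_nil, pvGroups, pvRuns_cons,
        pvRuns_nil, pvRunlen]
    | cons y t =>
      have hen : PySem.List.enumerate (x :: y :: t) s =
          (s, x) :: PySem.List.enumerate (y :: t) (s + 1) := by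
        rw [PySem.List.enumerate_cons]
      have hen2 : PySem.List.enumerate (y :: t) (s + 1) =
          (s + 1, y) :: PySem.List.enumerate t (s + 1 + 1) := by
        rw [PySem.List.enumerate_cons]
      rcases hg : pvGroups (PySem.List.enumerate (y :: t) (s + 1)) with _ | ⟨g, gs⟩
      · exact absurd hg (by rw [hen2]; exact pvGroups_ne_nil _ _)
      · have ih2 := ih (s + 1)
        rw [hg] at ih2
        rw [pvRuns_cons] at ih2 ⊢
        rw [hen, hen2, pvGroups, ← hen2, hg]
        by_cases hxy : x + 1 = y
        · have hkey : ((s, x).2 - (s, x).1 == (s + 1, y).2 - (s + 1, y).1) = true := by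
            simp only [beq_iff_eq]; omega
          rw [hkey]
          simp only [if_true]
          have hrl : pvRunlen (x :: y :: t) = pvRunlen (y :: t) + 1 := by
            simp only [pvRunlen]; rw [if_pos hxy]
          have htake : (x :: y :: t).take (pvRunlen (x :: y :: t)) =
              x :: (y :: t).take (pvRunlen (y :: t)) := by rw [hrl]; rfl
          have hdropr : (x :: y :: t).drop (pvRunlen (x :: y :: t)) =
              (y :: t).drop (pvRunlen (y :: t)) := by rw [hrl]; rfl
          rw [htake, hdropr]
          simp only [List.map_cons, List.cons.injEq] at ih2 ⊢
          refine ⟨⟨by trivial, ih2.1⟩, ih2.2⟩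
        · have hkey : ((s, x).2 - (s, x).1 == (s + 1, y).2 - (s + 1, y).1) = false := by
            simp only [beq_eq_false_iff_ne, ne_eq]; omega
          rw [hkey]
          simp only [Bool.false_eq_true, if_false]
          have hrl : pvRunlen (x :: y :: t) = 1 := by
            simp only [pvRunlen]; rw [if_neg hxy]
          rw [hrl]
          simp only [List.take_succ_cons, List.take_zero, List.drop_succ_cons, List.drop_zero,
            List.map_cons, List.map_nil, List.cons.injEq]
          refine ⟨by trivial, ?_⟩
          rw [pvRuns_cons y t]
          simpa using ih2

theorem pvChunks_eq_flatMap :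
    ∀ fuel (l : List Int), l.length ≤ fuel →
      pvChunks l = (pvRuns l).flatMap (fun g =>
        if 3 ≤ g.length then
          [PySem.Int.toChars (PySem.List.pyGetD g 0 0) ++ ['-'] ++
            PySem.Int.toChars (PySem.List.pyGetD g (-1) 0)]
        else g.map PySem.Int.toChars) := by
  intro fuel
  induction fuel with
  | zero =>
    intro l hl
    have : l = [] := List.eq_nil_of_length_eq_zero (by omega)
    subst this
    simp [pvChunks, pvRuns_nil]
  | succ fuel ih =>
    intro l hl
    cases l with
    | nil => simp [pvChunks, pvRuns_nil]
    | cons x xs =>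
      rw [pvRuns_cons]
      have hrpos : 1 ≤ pvRunlen (x :: xs) := pvRunlen_pos x xs
      have hrlen : pvRunlen (x :: xs) ≤ xs.length + 1 := by
        have := pvRunlen_le_length (x :: xs); simpa using this
      have hlen : ((x :: xs).take (pvRunlen (x :: xs))).length = pvRunlen (x :: xs) := by
        simp [List.length_take]; omega
      rw [List.flatMap_cons]
      by_cases h3 : 2 < pvRunlen (x :: xs)
      · -- one range chunk eats the whole run
        rw [pvChunks, dif_neg (by simp)]
        simp only []
        rw [if_pos h3]
        rw [if_pos (by omega : 3 ≤ ((x :: xs).take (pvRunlen (x :: xs))).length)]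
        have htke : (x :: xs).take (pvRunlen (x :: xs)) =
            x :: xs.take (pvRunlen (x :: xs) - 1) := by
          obtain ⟨r', hr'⟩ : ∃ r', pvRunlen (x :: xs) = r' + 1 := ⟨_, (Nat.succ_pred_eq_of_pos hrpos).symm⟩
          rw [hr']; simp
        have hhd : PySem.List.pyGetD ((x :: xs).take (pvRunlen (x :: xs))) 0 0 = (x :: xs).headD 0 := by
          rw [htke, PySem.List.pyGetD_zero_cons]; rfl
        have htne : (x :: xs).take (pvRunlen (x :: xs)) ≠ [] := by rw [htke]; simp
        have hlast : PySem.List.pyGetD ((x :: xs).take (pvRunlen (x :: xs))) (-1) 0 =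
            (x :: xs).getD (pvRunlen (x :: xs) - 1) 0 := by
          rw [PySem.List.pyGetD_neg_one (h := htne), List.getLast_eq_getElem]
          have hidx : ((x :: xs).take (pvRunlen (x :: xs))).length - 1 = pvRunlen (x :: xs) - 1 := by
            rw [hlen]
          have hlt : pvRunlen (x :: xs) - 1 < (x :: xs).length := by simp; omega
          rw [List.getD_eq_getElem _ _ hlt]
          rw [List.getElem_take]
          simp only [hlen]
        rw [hhd, hlast]
        rw [ih (List.drop (pvRunlen (x :: xs)) (x :: xs)) (by simp only [List.length_drop, List.length_cons]; simp only [List.length_cons] at hl; omega)]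
        simp
      · -- runlen 1 or 2: the run's elements are emitted one by one
        rw [if_neg (by omega : ¬ 3 ≤ ((x :: xs).take (pvRunlen (x :: xs))).length)]
        cases xs with
        | nil =>
          have hr1 : pvRunlen [x] = 1 := by simp [pvRunlen]
          rw [pvChunks, dif_neg (by simp)]
          simp only []
          rw [hr1]
          rw [if_neg (by omega)]
          simp only [List.take_succ_cons, List.take_zero, List.drop_succ_cons,
            List.drop_zero, List.tail_cons]
          rw [pvChunks, pvRuns_nil]
          simp
        | cons y t =>
          by_cases hxy : x + 1 = y
          · -- runlen 2 here, and the run of y is the single y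
            have hry : pvRunlen (y :: t) = 1 := by
              have h1 : 1 ≤ pvRunlen (y :: t) := pvRunlen_pos y t
              have h2 : pvRunlen (x :: y :: t) = pvRunlen (y :: t) + 1 := by
                simp only [pvRunlen]; rw [if_pos hxy]
              omega
            have hr2 : pvRunlen (x :: y :: t) = 2 := by
              have : pvRunlen (x :: y :: t) = pvRunlen (y :: t) + 1 := by
                simp only [pvRunlen]; rw [if_pos hxy]
              omega
            rw [pvChunks, dif_neg (by simp)]
            simp only []
            rw [hr2]
            rw [if_neg (by omega)]
            simp only [List.tail_cons]
            rw [pvChunks, dif_neg (by simp)]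
            simp only []
            rw [hry]
            rw [if_neg (by omega)]
            simp only [List.tail_cons]
            have ht2 : List.take 2 (x :: y :: t) = [x, y] := rfl
            have hd2 : List.drop 2 (x :: y :: t) = t := rfl
            rw [ht2, hd2]
            rw [ih t (by simp only [List.length_cons] at hl; omega)]
            simp
          · have hr1 : pvRunlen (x :: y :: t) = 1 := by
              simp only [pvRunlen]; rw [if_neg hxy]
            rw [pvChunks, dif_neg (by simp)]
            simp only []
            rw [hr1]
            rw [if_neg (by omega)]
            simp only [List.tail_cons, List.take_succ_cons, List.take_zero, List.drop_succ_cons,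
              List.drop_zero]
            rw [ih (y :: t) (by simp only [List.length_cons] at hl ⊢; omega)]
            simp

-- === commas: strip(",") of A's comma-terminated chunks = ",".join of B's parts ===

theorem pvDigits_no_comma : ∀ fuel n (ds : List Char), (∀ c ∈ ds, c ≠ ',') →
    ∀ c ∈ Nat.toDigitsCore 10 fuel n ds, c ≠ ',' := by
  intro fuel
  induction fuel with
  | zero => intro n ds hds c hc; exact hds c hc
  | succ fuel ih =>
    intro n ds hds c hc
    have hdigit : Nat.digitChar (n % 10) ≠ ',' := by
      have h10 : n % 10 < 10 := Nat.mod_lt _ (by omega)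
      have hall : ∀ m, m < 10 → Nat.digitChar m ≠ ',' := by decide
      exact hall _ h10
    have hds' : ∀ d ∈ (n % 10).digitChar :: ds, d ≠ ',' := by
      intro d hd
      rcases List.mem_cons.mp hd with rfl | hd
      · exact hdigit
      · exact hds d hd
    rw [Nat.toDigitsCore] at hc
    by_cases hz : n / 10 = 0
    · rw [if_pos hz] at hc
      exact hds' c hc
    · rw [if_neg hz] at hc
      exact ih _ _ hds' c hc

theorem pvToChars_no_comma (n : Int) : ∀ c ∈ PySem.Int.toChars n, c ≠ ',' := by
  intro c hc
  unfold PySem.Int.toChars at hc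
  split at hc
  · rcases List.mem_cons.mp hc with rfl | hc
    · decide
    · exact pvDigits_no_comma _ _ [] (by simp) c hc
  · exact pvDigits_no_comma _ _ [] (by simp) c hc

theorem pvDigitsCore_ne_nil : ∀ fuel n (ds : List Char), (0 < fuel ∨ ds ≠ []) →
    Nat.toDigitsCore 10 fuel n ds ≠ [] := by
  intro fuel
  induction fuel with
  | zero =>
    intro n ds h
    rcases h with h | h
    · omega
    · exact h
  | succ fuel ih =>
    intro n ds _
    rw [Nat.toDigitsCore]
    by_cases hz : n / 10 = 0
    · rw [if_pos hz]; simp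
    · rw [if_neg hz]; exact ih _ _ (Or.inr (by simp))

theorem pvToChars_ne_nil (n : Int) : PySem.Int.toChars n ≠ [] := by
  unfold PySem.Int.toChars
  split
  · simp
  · exact pvDigitsCore_ne_nil _ _ [] (Or.inl (by omega))

-- every chunk A emits is nonempty and contains no comma
theorem pvChunks_facts (cats : List Int) :
    ∀ g ∈ pvChunks cats, g ≠ [] ∧ ∀ c ∈ g, c ≠ ',' := by
  intro g hg
  rw [pvChunks_eq_flatMap cats.length cats (by omega)] at hg
  rw [List.mem_flatMap] at hg
  obtain ⟨run, _, hmem⟩ := hg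
  by_cases h3 : 3 ≤ run.length
  · rw [if_pos h3] at hmem
    simp only [List.mem_singleton] at hmem
    subst hmem
    refine ⟨by simp, ?_⟩
    intro c hc
    simp only [List.mem_append] at hc
    rcases hc with (hc | hc) | hc
    · exact pvToChars_no_comma _ c hc
    · simp only [List.mem_singleton] at hc; subst hc; decide
    · exact pvToChars_no_comma _ c hc
  · rw [if_neg h3] at hmem
    rw [List.mem_map] at hmem
    obtain ⟨v, _, rfl⟩ := hmem
    exact ⟨pvToChars_ne_nil _, fun c hc => pvToChars_no_comma _ c hc⟩

theorem pv_intercalate_snoc (parts : List (List Char)) (g : List Char) :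
    List.intercalate [','] (parts ++ [g]) = ((parts.map (· ++ [','])).flatten) ++ g := by
  induction parts with
  | nil => simp [List.intercalate]
  | cons h t ih =>
    cases t with
    | nil => simp [List.intercalate, List.intersperse]
    | cons h2 t2 =>
      have step : List.intercalate [','] (h :: h2 :: (t2 ++ [g])) =
          h ++ ([','] ++ List.intercalate [','] (h2 :: (t2 ++ [g]))) := by
        simp [List.intercalate, List.intersperse_cons₂]
      simp only [List.cons_append] at ih ⊢
      rw [step, ih]
      simp [List.append_assoc]

theorem pvStrip_flatten (parts : List (List Char))
    (hne : ∀ g ∈ parts, g ≠ []) (hc : ∀ g ∈ parts, ∀ c ∈ g, c ≠ ',') :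
    PySem.Chars.stripChars ((parts.map (· ++ [','])).flatten) [','] =
      PySem.Chars.join [','] parts := by
  rcases List.eq_nil_or_concat parts with rfl | ⟨init, g, rfl⟩
  · simp [PySem.Chars.stripChars, PySem.Chars.join, List.intercalate]
  · simp only [List.concat_eq_append] at hne hc ⊢
    have hgne : g ≠ [] := hne g (by simp)
    have hflat : (((init ++ [g]).map (· ++ [','])).flatten) =
        (init.map (· ++ [','])).flatten ++ (g ++ [',']) := by
      simp
    -- the left strip is a no-op: the first character is not a comma
    have hl : List.dropWhile (fun c => [','].contains c) (((init ++ [g]).map (· ++ [','])).flatten)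
        = ((init ++ [g]).map (· ++ [','])).flatten := by
      cases hinit : init with
      | nil =>
        obtain ⟨c0, g', rfl⟩ := List.exists_cons_of_ne_nil hgne
        have hc0 : ¬ (c0 = ',') := hc (c0 :: g') (by simp) c0 (by simp)
        simp [hc0]
      | cons hd tl =>
        have hhne : hd ≠ [] := hne hd (by simp [hinit])
        obtain ⟨c0, h', rfl⟩ := List.exists_cons_of_ne_nil hhne
        have hc0 : ¬ (c0 = ',') := hc (c0 :: h') (by simp [hinit]) c0 (by simp)
        simp [hc0]
    -- the right strip removes exactly the final comma
    obtain ⟨d, w, hgrev⟩ : ∃ d w, g.reverse = d :: w :=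
      List.exists_cons_of_ne_nil (by simpa using hgne)
    have hd : d ≠ ',' := by
      have hdg : d ∈ g := by
        have : d ∈ g.reverse := by rw [hgrev]; simp
        simpa using this
      exact hc g (by simp) d hdg
    have hrev : ((((init ++ [g]).map (· ++ [','])).flatten)).reverse =
        ',' :: (d :: (w ++ ((init.map (· ++ [','])).flatten).reverse)) := by
      rw [hflat]
      simp [hgrev, List.reverse_append]
    simp only [PySem.Chars.stripChars]
    rw [hl, hrev]
    rw [List.dropWhile_cons]
    simp only [List.contains_cons, beq_self_eq_true, if_true, List.contains_nil,
      Bool.or_false]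
    rw [List.dropWhile_cons]
    rw [if_neg (by simp [hd])]
    have hgw : (d :: w).reverse = g := by rw [← hgrev]; simp
    show (d :: (w ++ ((init.map (· ++ [','])).flatten).reverse)).reverse =
      PySem.Chars.join [','] (init ++ [g])
    rw [show PySem.Chars.join [','] (init ++ [g]) = List.intercalate [','] (init ++ [g]) from rfl]
    rw [pv_intercalate_snoc]
    rw [show (d :: (w ++ ((init.map (· ++ [','])).flatten).reverse)) =
      (d :: w) ++ ((init.map (· ++ [','])).flatten).reverse from rfl]
    rw [List.reverse_append, List.reverse_reverse, hgw]

-- ===== VERDICT (by name: the statement is the Claim_ definition above) =====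
theorem ListOfCatsToRange_spec : Claim_equal_ListOfCatsToRange := by
  intro cats _dom
  show ListOfCatsToRange cats = ListOfCatsToRange_alt cats
  simp only [ListOfCatsToRange, ListOfCatsToRange_alt]
  rw [pvOuterA_eq cats cats.length 0 [] (by omega)]
  simp only [List.drop_zero, List.nil_append]
  rw [pvStrip_flatten _ (fun g hg => (pvChunks_facts cats g hg).1)
    (fun g hg => (pvChunks_facts cats g hg).2)]
  congr 1
  rw [pvChunks_eq_flatMap cats.length cats (by omega), ← pvGroups_eq_runs cats 0,
    List.flatMap_map]
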